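-- pv_equiv track=rewrite | github.com/asd55667/Jianzhi_offer | 42FindNumbersWithSum.py | FindNumbersWithSum
-- ===== SOURCE A (Python) =====
-- def FindNumbersWithSum(nums, s):
--     h = {}
--     res = []
--     for n in nums:
--         if n not in h:
--             h[s-n] = n
--         else:
--             res.append([h[n],n])
--     if res:
--         res.sort(key=lambda x: x[0]*x[1])
--         return res[0]
--     return []
-- ===== SOURCE B (Python) =====
-- def FindNumbersWithSum(nums, s):
--     # Single pass: track the running min-product pair instead of collecting all
--     # pairs and sorting them.
--     seen = set()
--     best = None
--     for n in nums:
--         if n in seen: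
--             if best is None or (s - n) * n < best[0] * best[1]:
--                 best = [s - n, n]
--         else:
--             seen.add(s - n)
--     return best if best is not None else []
-- ===== Notes on version B (the rewrite author's own statement) =====
-- stated objective: alternative
-- what changed: Replaces collecting every complementary pair and sorting by product with a single pass that keeps the running minimum-product pair (first one on ties, matching the stable sort).
import Mathlib
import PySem

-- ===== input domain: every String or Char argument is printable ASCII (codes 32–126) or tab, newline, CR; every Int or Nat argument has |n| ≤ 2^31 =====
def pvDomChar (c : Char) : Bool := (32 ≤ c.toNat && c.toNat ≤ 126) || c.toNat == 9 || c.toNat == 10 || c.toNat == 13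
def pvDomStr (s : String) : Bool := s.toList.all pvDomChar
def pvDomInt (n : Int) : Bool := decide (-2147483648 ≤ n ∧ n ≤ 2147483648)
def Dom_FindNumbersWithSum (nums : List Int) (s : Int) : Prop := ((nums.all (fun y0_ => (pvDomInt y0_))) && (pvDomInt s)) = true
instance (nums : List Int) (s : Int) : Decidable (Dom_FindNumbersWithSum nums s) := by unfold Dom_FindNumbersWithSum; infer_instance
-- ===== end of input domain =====

-- B replaces collect-all-pairs-then-sort-by-product with a single pass keeping the running min-product pair (first on ties, matching the stable sort).


-- ===== PORT A =====
-- Python's inner two-element lists [h[n], n] are carried as pairs; the final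
-- return turns the chosen pair back into a two-element list.  'res[0]' after the
-- 'if res:' guard is read off by matching on the sorted list (nonempty there).
def FindNumbersWithSum (nums : List Int) (s : Int) : List Int :=
  let st := nums.foldl
    (fun (st : PySem.Dict Int Int × List (Int × Int)) n =>
      if st.1.contains n = false then (st.1.insert (s - n) n, st.2)
      else (st.1, st.2 ++ [(st.1.getD n 0, n)]))
    (PySem.Dict.empty, [])
  match PySem.List.sorted st.2 (fun x => x.1 * x.2) with
  | [] => []                 -- 'if res:' is false: return []
  | p :: _ => [p.1, p.2]     -- res.sort(key=...); return res[0]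

-- ===== PORT B =====
def FindNumbersWithSum_alt (nums : List Int) (s : Int) : List Int :=
  let st := nums.foldl
    (fun (st : PySem.Set Int × Option (Int × Int)) n =>
      if st.1.contains n then
        match st.2 with
        | none => (st.1, some (s - n, n))
        | some b => if (s - n) * n < b.1 * b.2 then (st.1, some (s - n, n)) else (st.1, some b)
      else (PySem.Set.add st.1 (s - n), st.2))
    (PySem.Set.empty, none)
  match st.2 with
  | some b => [b.1, b.2]
  | none => []

-- ===== PRECONDITION & SPEC =====
def Spec_FindNumbersWithSum (nums : List Int) (s : Int) (out : List Int) : Prop := out = FindNumbersWithSum_alt nums s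
instance (nums : List Int) (s : Int) (out : List Int) : Decidable (Spec_FindNumbersWithSum nums s out) := by unfold Spec_FindNumbersWithSum; infer_instance

-- ===== CLAIM (what is proved, stated in full; the proofs are below) =====
def Claim_equal_FindNumbersWithSum : Prop := ∀ (nums : List Int) (s : Int), Dom_FindNumbersWithSum nums s → Spec_FindNumbersWithSum nums s (FindNumbersWithSum nums s)

-- ===== LEMMAS AND PROOFS =====

-- The one step of B's running-minimum accumulator, named so it can be equated
-- with PySem.List.min?'s fold step.
def minStep (acc : Option (Int × Int)) (x : Int × Int) : Option (Int × Int) :=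
  match acc with
  | none => some x
  | some m => if x.1 * x.2 < m.1 * m.2 then some x else some m

lemma min?_eq_foldl_minStep (res : List (Int × Int)) :
    PySem.List.min? res (fun x => x.1 * x.2) = res.foldl minStep none := by
  unfold PySem.List.min?
  apply PySem.List.foldl_congr_mem
  intro acc x _
  cases acc with
  | none => rfl
  | some m => simp only [minStep]

lemma min?_append_singleton (res : List (Int × Int)) (x : Int × Int) :
    PySem.List.min? (res ++ [x]) (fun x => x.1 * x.2)
      = minStep (PySem.List.min? res (fun x => x.1 * x.2)) x := by
  rw [min?_eq_foldl_minStep, min?_eq_foldl_minStep, List.foldl_append]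
  rfl

-- Python's stable sort puts a FIRST element of minimal key in front: the head of
-- 'sorted res key' is exactly 'min? res key' (the first minimal element).
lemma head_sorted_eq_min? (res : List (Int × Int)) :
    (PySem.List.sorted res (fun x => x.1 * x.2)).head? = PySem.List.min? res (fun x => x.1 * x.2) := by
  induction res using List.reverseRecOn with
  | nil => rfl
  | append_singleton res x ih =>
    have h1 : PySem.List.sorted (res ++ [x]) (fun x => x.1 * x.2)
        = PySem.List.insertBy (fun a b => decide (a.1 * a.2 < b.1 * b.2)) x
            (PySem.List.sorted res (fun x => x.1 * x.2)) := by
      rw [PySem.List.sorted_eq_foldl_insertBy, PySem.List.sorted_eq_foldl_insertBy,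
        List.foldl_append]
      rfl
    rw [h1, min?_append_singleton, ← ih]
    cases hs : PySem.List.sorted res (fun x => x.1 * x.2) with
    | nil => rfl
    | cons y ys =>
      show (PySem.List.insertBy (fun a b => decide (a.1 * a.2 < b.1 * b.2)) x (y :: ys)).head?
        = minStep (some y) x
      simp only [PySem.List.insertBy, minStep]
      by_cases hxy : x.1 * x.2 < y.1 * y.2
      · rw [if_pos (decide_eq_true hxy), if_pos hxy]; rfl
      · rw [if_neg (by simpa using hxy), if_neg hxy]; rfl

-- The loop invariant tying A's (dict, pair list) state to B's (set, best) state: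
-- same key membership, every stored value is s - key, and best is the
-- first-minimal pair of the collected list.
lemma loop_inv (s : Int) (nums : List Int) :
    ∀ (h : PySem.Dict Int Int) (res : List (Int × Int)) (seen : PySem.Set Int)
      (best : Option (Int × Int)),
      (∀ k : Int, h.contains k = seen.contains k) →
      (∀ k v : Int, h.get? k = some v → v = s - k) →
      best = PySem.List.min? res (fun x => x.1 * x.2) →
      (∀ k : Int,
        (nums.foldl
          (fun (st : PySem.Dict Int Int × List (Int × Int)) n =>
            if st.1.contains n = false then (st.1.insert (s - n) n, st.2)
            else (st.1, st.2 ++ [(st.1.getD n 0, n)])) (h, res)).1.contains k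
        = (nums.foldl
          (fun (st : PySem.Set Int × Option (Int × Int)) n =>
            if st.1.contains n then
              match st.2 with
              | none => (st.1, some (s - n, n))
              | some b => if (s - n) * n < b.1 * b.2 then (st.1, some (s - n, n)) else (st.1, some b)
            else (PySem.Set.add st.1 (s - n), st.2)) (seen, best)).1.contains k) ∧
      (∀ k v : Int,
        (nums.foldl
          (fun (st : PySem.Dict Int Int × List (Int × Int)) n =>
            if st.1.contains n = false then (st.1.insert (s - n) n, st.2)
            else (st.1, st.2 ++ [(st.1.getD n 0, n)])) (h, res)).1.get? k = some v → v = s - k) ∧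
      (nums.foldl
        (fun (st : PySem.Set Int × Option (Int × Int)) n =>
          if st.1.contains n then
            match st.2 with
            | none => (st.1, some (s - n, n))
            | some b => if (s - n) * n < b.1 * b.2 then (st.1, some (s - n, n)) else (st.1, some b)
          else (PySem.Set.add st.1 (s - n), st.2)) (seen, best)).2
      = PySem.List.min?
          ((nums.foldl
            (fun (st : PySem.Dict Int Int × List (Int × Int)) n =>
              if st.1.contains n = false then (st.1.insert (s - n) n, st.2)
              else (st.1, st.2 ++ [(st.1.getD n 0, n)])) (h, res)).2)
          (fun x => x.1 * x.2) := by
  induction nums with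
  | nil => intro h res seen best h1 h2 h3; exact ⟨h1, h2, by simpa using h3⟩
  | cons n t ih =>
    intro h res seen best h1 h2 h3
    by_cases hc : h.contains n = true
    · -- n already a key of h: A appends (h[n], n); B updates best
      have hsc : seen.contains n = true := by rw [← h1]; exact hc
      have hmem : n ∈ seen := (PySem.Set.contains_iff seen n).mp hsc
      obtain ⟨v, hv⟩ : ∃ v, h.get? n = some v := by
        have := PySem.Dict.contains_eq_isSome_get? h n
        rw [hc] at this
        exact Option.isSome_iff_exists.mp this.symm
      have hgv : h.getD n 0 = s - n := by
        rw [PySem.Dict.getD_of_get?_eq_some h 0 hv]; exact h2 n v hv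
      cases best with
      | none =>
        have hstep : (some (s - n, n) : Option (Int × Int))
            = PySem.List.min? (res ++ [(s - n, n)]) (fun x => x.1 * x.2) := by
          rw [min?_append_singleton, ← h3]; rfl
        have := ih h (res ++ [(s - n, n)]) seen (some (s - n, n)) h1 h2 hstep
        simpa [List.foldl_cons, hc, hsc, hmem, hgv] using this
      | some b =>
        by_cases hlt : (s - n) * n < b.1 * b.2
        · have hstep : (some (s - n, n) : Option (Int × Int))
              = PySem.List.min? (res ++ [(s - n, n)]) (fun x => x.1 * x.2) := by
            rw [min?_append_singleton, ← h3]
            simp only [minStep]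
            rw [if_pos hlt]
          have := ih h (res ++ [(s - n, n)]) seen (some (s - n, n)) h1 h2 hstep
          simpa [List.foldl_cons, hc, hsc, hmem, hgv, hlt] using this
        · have hstep : (some b : Option (Int × Int))
              = PySem.List.min? (res ++ [(s - n, n)]) (fun x => x.1 * x.2) := by
            rw [min?_append_singleton, ← h3]
            simp only [minStep]
            rw [if_neg hlt]
          have := ih h (res ++ [(s - n, n)]) seen (some b) h1 h2 hstep
          simpa [List.foldl_cons, hc, hsc, hmem, hgv, hlt] using this
    · -- n fresh: A inserts s-n ↦ n; B adds s-n to seen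
      have hcf : h.contains n = false := by revert hc; cases h.contains n <;> simp
      have hsc : seen.contains n = false := by rw [← h1]; exact hcf
      have hnmem : ¬ (n ∈ seen) := by
        intro hm
        rw [(PySem.Set.contains_iff seen n).mpr hm] at hsc
        simp at hsc
      have h1' : ∀ k : Int,
          (h.insert (s - n) n).contains k = (PySem.Set.add seen (s - n)).contains k := by
        intro k
        rw [PySem.Dict.contains_insert]
        by_cases hk : k = s - n
        · subst hk
          simp [PySem.Set.mem_add]
        · have hbeq : (k == s - n) = false := by simp [hk]
          rw [hbeq, Bool.false_or, h1]
          have hiff : ((PySem.Set.add seen (s - n)).contains k = true)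
              ↔ (seen.contains k = true) := by
            rw [PySem.Set.contains_iff, PySem.Set.mem_add, PySem.Set.contains_iff]
            tauto
          revert hiff
          cases seen.contains k <;> cases (PySem.Set.add seen (s - n)).contains k <;> simp
      have h2' : ∀ k v : Int, (h.insert (s - n) n).get? k = some v → v = s - k := by
        intro k v hkv
        by_cases hk : k = s - n
        · subst hk
          rw [PySem.Dict.get?_insert_self] at hkv
          injection hkv with h'
          omega
        · rw [PySem.Dict.get?_insert_of_ne h n hk] at hkv
          exact h2 k v hkv
      have := ih (h.insert (s - n) n) res (PySem.Set.add seen (s - n)) best h1' h2' h3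
      simpa [List.foldl_cons, hcf, hsc, hnmem] using this

-- ===== VERDICT (by name: the statement is the Claim_ definition above) =====
theorem FindNumbersWithSum_spec : Claim_equal_FindNumbersWithSum := by
  intro nums s _
  unfold Spec_FindNumbersWithSum FindNumbersWithSum FindNumbersWithSum_alt
  dsimp only
  obtain ⟨-, -, hbest⟩ := loop_inv s nums PySem.Dict.empty [] PySem.Set.empty none
    (by intro k; simp [PySem.Dict.contains_empty])
    (by intro k v hv; simp [PySem.Dict.get?_empty] at hv)
    (by rfl)
  rw [hbest, ← head_sorted_eq_min?]
  cases PySem.List.sorted _ (fun x : Int × Int => x.1 * x.2) with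
  | nil => rfl
  | cons p t => rfl
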